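-- pv_equiv track=rewrite | github.com/rpidanny/advent-of-code | 2025/Day01/solutions.py | part2
-- ===== SOURCE A (Python) =====
-- def part2(inputs: list[str], start_pos: int = 50) -> int:
--     pos, count = start_pos, 0
--
--     for line in inputs:
--         dirc, times = line[:1], int(line[1:])
--         if dirc == "L":
--             # we need i in [1..times] such that (pos - i) % 100 == 0  -> i ≡ pos (mod 100)
--             i = pos % 100
--             pos = (pos - times) % 100
--         else:  # "R"
--             # we need i in [1..times] such that (pos + i) % 100 == 0 -> i ≡ (100 - pos) (mod 100)
--             i = (100 - pos) % 100
--             pos = (pos + times) % 100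
--
--         if i == 0:
--             i = 100  # next time we hit 0 is after 100 steps
--         if i <= times:
--             count += ((times - i) // 100) + 1
--
--     return count
-- ===== SOURCE B (Python) =====
-- def part2(inputs: list[str], start_pos: int = 50) -> int:
--     # Direct step-by-step simulation: walk one unit at a time and count every
--     # visit to a position that is a multiple of 100.
--     pos, count = start_pos, 0
--     for line in inputs:
--         dirc, times = line[:1], int(line[1:])
--         step = -1 if dirc == "L" else 1
--         for _ in range(times):
--             pos += step
--             if pos % 100 == 0:
--                 count += 1
--     return count
-- ===== Notes on version B (the rewrite author's own statement) =====
-- stated objective: alternative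
-- what changed: B abandons A's per-line modular closed-form (candidate step i, i==0->100, quotient formula) and literally simulates the walk one unit at a time, counting every visit to a multiple of 100; Pre_ keeps lines whose count parses and is nonnegative (negative counts are outside the puzzle's natural domain: A treats them as a modular move, B's simulation takes no steps).
-- outside the precondition, e.g. on part2(['L-50', 'R60'], 50): A returns 0, B returns 1
import Mathlib
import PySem

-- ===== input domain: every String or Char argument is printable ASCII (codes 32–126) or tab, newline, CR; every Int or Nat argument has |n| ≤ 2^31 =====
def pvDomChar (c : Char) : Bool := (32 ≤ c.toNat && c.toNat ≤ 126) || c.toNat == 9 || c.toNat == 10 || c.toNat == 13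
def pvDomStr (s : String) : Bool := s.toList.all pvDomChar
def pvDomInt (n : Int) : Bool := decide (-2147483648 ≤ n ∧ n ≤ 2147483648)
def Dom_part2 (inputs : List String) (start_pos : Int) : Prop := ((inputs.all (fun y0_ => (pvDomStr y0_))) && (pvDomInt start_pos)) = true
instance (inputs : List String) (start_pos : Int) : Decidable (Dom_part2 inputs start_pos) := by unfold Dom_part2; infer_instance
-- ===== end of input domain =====

-- B replaces A's per-line modular closed-form count by a literal unit-step simulation
-- of the walk (objective: alternative; not faster — it walks every step).

-- ===== PORT A =====
-- loop body of A, one line: state is (pos, count)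
def part2_stepA (st : Int × Int) (line : String) : Int × Int :=
  let dirc := PySem.Str.slice line none (some 1)
  let times := (PySem.Int.ofStr? (PySem.Str.slice line (some 1) none)).getD 0
  if dirc == "L" then
    let i := PySem.Int.mod st.1 100
    let pos := PySem.Int.mod (st.1 - times) 100
    let i := if i == 0 then (100 : Int) else i
    if i ≤ times then (pos, st.2 + (PySem.Int.floordiv (times - i) 100 + 1)) else (pos, st.2)
  else
    let i := PySem.Int.mod (100 - st.1) 100
    let pos := PySem.Int.mod (st.1 + times) 100
    let i := if i == 0 then (100 : Int) else i
    if i ≤ times then (pos, st.2 + (PySem.Int.floordiv (times - i) 100 + 1)) else (pos, st.2)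

def part2 (inputs : List String) (start_pos : Int) : Int :=
  (inputs.foldl part2_stepA (start_pos, 0)).2

-- ===== PORT B =====
-- inner loop of B: n remaining unit steps of size `step`; state is (pos, count)
def part2_walk (step : Int) : Nat → Int × Int → Int × Int
  | 0, st => st
  | n + 1, st =>
      let pos := st.1 + step
      part2_walk step n (pos, if PySem.Int.mod pos 100 == 0 then st.2 + 1 else st.2)

-- loop body of B, one line (range over a negative count yields no steps: .toNat)
def part2_stepB (st : Int × Int) (line : String) : Int × Int :=
  let dirc := PySem.Str.slice line none (some 1)
  let times := (PySem.Int.ofStr? (PySem.Str.slice line (some 1) none)).getD 0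
  let step : Int := if dirc == "L" then -1 else 1
  part2_walk step times.toNat st

def part2_alt (inputs : List String) (start_pos : Int) : Int :=
  (inputs.foldl part2_stepB (start_pos, 0)).2

-- ===== PRECONDITION & SPEC =====
-- Pre_ excludes lines on which Python's int(line[1:]) raises ValueError, and lines with a
-- negative count, which are outside the puzzle's natural domain (there A applies a modular
-- move while B's simulation takes no steps).
def part2_okLine (line : String) : Bool :=
  match PySem.Int.ofStr? (PySem.Str.slice line (some 1) none) with
  | some t => decide (0 ≤ t)
  | none => false
def Pre_part2 (inputs : List String) (start_pos : Int) : Prop :=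
  inputs.all part2_okLine = true
instance (inputs : List String) (start_pos : Int) : Decidable (Pre_part2 inputs start_pos) := by unfold Pre_part2; infer_instance
def pvWitness_part2 : List String × Int := (["L250", "R7", "L0"], 50)

def Spec_part2 (inputs : List String) (start_pos : Int) (out : Int) : Prop := out = part2_alt inputs start_pos
instance (inputs : List String) (start_pos : Int) (out : Int) : Decidable (Spec_part2 inputs start_pos out) := by unfold Spec_part2; infer_instance

-- ===== CLAIM (what is proved, stated in full; the proofs are below) =====
def Claim_equal_part2 : Prop := ∀ (inputs : List String) (start_pos : Int), Dom_part2 inputs start_pos → Pre_part2 inputs start_pos → Spec_part2 inputs start_pos (part2 inputs start_pos)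

-- ===== LEMMAS AND PROOFS =====

-- closed form of the rightward walk: final position and number of multiples of 100 crossed
theorem part2_walk_right (n : Nat) : ∀ (p c : Int),
    part2_walk 1 n (p, c) = (p + n, c + ((p + n) / 100 - p / 100)) := by
  induction n with
  | zero => intro p c; simp [part2_walk]
  | succ n ih =>
    intro p c
    simp only [part2_walk, ih (p + 1),
      PySem.Int.mod_eq_emod_of_pos (show (0:Int) < 100 by norm_num), beq_iff_eq,
      Prod.mk.injEq]
    split_ifs with hz <;> refine ⟨by push_cast; ring, by push_cast; omega⟩

-- closed form of the leftward walk
theorem part2_walk_left (n : Nat) : ∀ (p c : Int),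
    part2_walk (-1) n (p, c) = (p - n, c + ((p - 1) / 100 - (p - 1 - n) / 100)) := by
  induction n with
  | zero => intro p c; simp [part2_walk]
  | succ n ih =>
    intro p c
    simp only [part2_walk, show ∀ q : Int, q + (-1) = q - 1 from fun q => by ring, ih (p - 1),
      PySem.Int.mod_eq_emod_of_pos (show (0:Int) < 100 by norm_num), beq_iff_eq,
      Prod.mk.injEq]
    split_ifs with hz <;> refine ⟨by push_cast; ring, by push_cast; omega⟩

-- one line: congruent positions mod 100 and equal counts are preserved (count nonnegative)
set_option maxHeartbeats 1000000 in
theorem part2_step_inv (pa pb c : Int) (line : String)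
    (h : pa % 100 = pb % 100)
    (ht : part2_okLine line = true) :
    (part2_stepA (pa, c) line).1 % 100 = (part2_stepB (pb, c) line).1 % 100 ∧
      (part2_stepA (pa, c) line).2 = (part2_stepB (pb, c) line).2 := by
  unfold part2_okLine at ht
  cases hp : PySem.Int.ofStr? (PySem.Str.slice line (some 1) none) with
  | none => rw [hp] at ht; simp at ht
  | some t =>
    rw [hp] at ht; simp only [decide_eq_true_eq] at ht
    have hn : (t.toNat : Int) = t := Int.toNat_of_nonneg ht
    by_cases hd : PySem.Str.slice line none (some 1) = "L"
    · simp only [part2_stepA, part2_stepB, hp, Option.getD_some, hd, beq_self_eq_true,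
        if_true, part2_walk_left, hn,
        PySem.Int.mod_eq_emod_of_pos (show (0:Int) < 100 by norm_num),
        PySem.Int.floordiv_eq_ediv_of_pos (show (0:Int) < 100 by norm_num),
        beq_iff_eq]
      constructor
      · split_ifs <;> simp <;> omega
      · split_ifs <;> simp <;> omega
    · simp only [part2_stepA, part2_stepB, hp, Option.getD_some, beq_iff_eq, hd,
        if_false, part2_walk_right, hn,
        PySem.Int.mod_eq_emod_of_pos (show (0:Int) < 100 by norm_num),
        PySem.Int.floordiv_eq_ediv_of_pos (show (0:Int) < 100 by norm_num)]
      constructor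
      · split_ifs <;> simp <;> omega
      · split_ifs <;> simp <;> omega

-- fold invariant over the whole input list
set_option maxHeartbeats 1000000 in
theorem part2_fold_eq : ∀ (inputs : List String) (pa pb c : Int),
    pa % 100 = pb % 100 →
    (inputs.all part2_okLine = true) →
    (inputs.foldl part2_stepA (pa, c)).2 = (inputs.foldl part2_stepB (pb, c)).2 := by
  intro inputs
  induction inputs with
  | nil => intro pa pb c h _; simp
  | cons line rest ih =>
    intro pa pb c h hall
    simp only [List.all_cons, Bool.and_eq_true] at hall
    simp only [List.foldl_cons]
    obtain ⟨h1, h2⟩ := part2_step_inv pa pb c line h hall.1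
    cases hA : part2_stepA (pa, c) line with
    | mk a1 a2 =>
      cases hB : part2_stepB (pb, c) line with
      | mk b1 b2 =>
        rw [hA, hB] at h1 h2
        subst h2
        exact ih a1 b1 a2 h1 hall.2

-- ===== VERDICT (by name: the statement is the Claim_ definition above) =====
theorem part2_spec : Claim_equal_part2 := by
  intro inputs start_pos _ hpre
  unfold Spec_part2 part2 part2_alt
  exact part2_fold_eq inputs start_pos start_pos 0 rfl hpre
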